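-- pv_equiv track=rewrite | github.com/Zacchua/AoC-2020 | day10/day10.py | combs
-- ===== SOURCE A (Python) =====
-- from itertools import combinations
--
-- def combs(xss):
--     total = 1
--     for xs in xss:
--         count = 0
--         n = len(xs) - 3
--         if n < 0:
--             n = 0
--         for i in range(n + 1, len(xs)):
--             for j in combinations(xs, i):
--                 if xs[len(xs) - 1] in j:
--                     count += 1
--         total = total * (count + 1)
--     return total
-- ===== SOURCE B (Python) =====
-- def _comb(n, r):
--     if r < 0 or r > n:
--         return 0
--     out = 1
--     for t in range(r):
--         out = out * (n - t) // (t + 1)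
--     return out
--
--
-- def combs(xss):
--     total = 1
--     for xs in xss:
--         m = len(xs)
--         count = 0
--         if m >= 2:
--             k = xs.count(xs[-1])
--             for i in range(max(m - 2, 1), m):
--                 count += _comb(m, i) - _comb(m - k, i)
--         total *= count + 1
--     return total
-- ===== Notes on version B (the rewrite author's own statement) =====
-- stated objective: faster
-- what changed: Replaces the enumeration of the itertools.combinations of each group (testing membership of the last value in every generated tuple) by a closed-form binomial count C(m,i) - C(m-k,i) per size i in the same range, where k is the multiplicity of the last value.
import Mathlib
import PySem

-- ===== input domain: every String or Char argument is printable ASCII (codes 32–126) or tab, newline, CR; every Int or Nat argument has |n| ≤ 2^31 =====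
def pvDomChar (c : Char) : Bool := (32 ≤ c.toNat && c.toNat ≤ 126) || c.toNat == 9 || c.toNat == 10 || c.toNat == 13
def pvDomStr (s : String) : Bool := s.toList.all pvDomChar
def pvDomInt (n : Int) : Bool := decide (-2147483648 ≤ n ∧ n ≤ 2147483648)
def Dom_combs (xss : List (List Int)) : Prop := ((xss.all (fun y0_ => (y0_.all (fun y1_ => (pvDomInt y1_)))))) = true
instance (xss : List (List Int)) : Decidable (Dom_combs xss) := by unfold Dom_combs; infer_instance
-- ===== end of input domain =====

-- B replaces A's enumeration of all combinations of each group by a closed-form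
-- binomial count C(m,i) - C(m-k,i) per size i (objective: faster, asymptotically).

-- ===== PORT A =====
-- itertools.combinations(xs, r), as the list of r-element position-subsequences
def pyCombinations (r : Nat) (xs : List Int) : List (List Int) :=
  match r, xs with
  | 0, _ => [[]]
  | _ + 1, [] => []
  | r + 1, x :: rest =>
      (pyCombinations r rest).map (fun j => x :: j) ++ pyCombinations (r + 1) rest

def combs (xss : List (List Int)) : Int :=
  xss.foldl (fun total xs =>
    let n : Int := if ((xs.length : Int) - 3) < 0 then 0 else (xs.length : Int) - 3
    let count : Int :=
      (PySem.List.pyRange (n + 1) (xs.length : Int) 1).foldl (fun c i =>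
        (pyCombinations i.toNat xs).foldl (fun c j =>
          if (PySem.List.pyGet? xs ((xs.length : Int) - 1)).any (fun v => j.contains v)
          then c + 1 else c) c) 0
    total * (count + 1)) 1

-- ===== PORT B =====
-- Source B's _comb: multiplicative binomial-coefficient loop (exact integer division)
def combHelper (n r : Int) : Int :=
  if r < 0 || n < r then 0
  else (PySem.List.pyRange 0 r 1).foldl
        (fun out t => PySem.Int.floordiv (out * (n - t)) (t + 1)) 1

def combs_alt (xss : List (List Int)) : Int :=
  xss.foldl (fun total xs =>
    let m : Int := (xs.length : Int)
    let count : Int :=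
      if 2 ≤ m then
        match PySem.List.pyGet? xs (-1) with
        | some v =>
            let k : Int := (PySem.List.count xs v : Int)
            (PySem.List.pyRange (max (m - 2) 1) m 1).foldl
              (fun c i => c + (combHelper m i - combHelper (m - k) i)) 0
        | none => 0
      else 0
    total * (count + 1)) 1

-- ===== PRECONDITION & SPEC =====
def Spec_combs (xss : List (List Int)) (out : Int) : Prop := out = combs_alt xss
instance (xss : List (List Int)) (out : Int) : Decidable (Spec_combs xss out) := by unfold Spec_combs; infer_instance

-- ===== CLAIM (what is proved, stated in full; the proofs are below) =====
def Claim_equal_combs : Prop := ∀ (xss : List (List Int)), Dom_combs xss → Spec_combs xss (combs xss)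

-- ===== LEMMAS AND PROOFS =====

theorem length_pyCombinations (r : Nat) (xs : List Int) :
    (pyCombinations r xs).length = Nat.choose xs.length r := by
  induction xs generalizing r with
  | nil => cases r <;> simp [pyCombinations]
  | cons x rest ih =>
    cases r with
    | zero => simp [pyCombinations]
    | succ r => simp [pyCombinations, ih, Nat.choose_succ_succ]

theorem countP_not_contains (v : Int) (r : Nat) (xs : List Int) :
    (pyCombinations r xs).countP (fun j => !(j.contains v)) =
      Nat.choose ((xs.filter (fun x => !(x == v))).length) r := by
  induction xs generalizing r with
  | nil => cases r <;> simp [pyCombinations]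
  | cons x rest ih =>
    cases r with
    | zero => simp [pyCombinations]
    | succ r =>
      simp only [pyCombinations, List.countP_append, List.countP_map, Function.comp_def]
      by_cases hxv : x = v
      · subst hxv
        have hp : (fun j : List Int => !((x :: j).contains x)) = fun _ => false := by
          funext j; simp
        have hf : (x :: rest).filter (fun y => !(y == x)) = rest.filter (fun y => !(y == x)) := by
          simp
        rw [hp, hf, ih]
        simp [List.countP_false]
      · have hp : (fun j : List Int => !((x :: j).contains v)) = (fun j => !(j.contains v)) := by
          funext j
          simp [Ne.symm hxv]
        have hf : (x :: rest).filter (fun y => !(y == v)) =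
            x :: rest.filter (fun y => !(y == v)) := by
          simp [hxv]
        rw [hp, ih, ih, hf]
        simp [Nat.choose_succ_succ]

theorem countP_contains (v : Int) (r : Nat) (xs : List Int) :
    (pyCombinations r xs).countP (fun j => j.contains v) =
      Nat.choose xs.length r - Nat.choose ((xs.filter (fun x => !(x == v))).length) r := by
  have h := (List.length_eq_countP_add_countP (p := fun j : List Int => j.contains v)
    (l := pyCombinations r xs))
  rw [length_pyCombinations] at h
  have h2 := countP_not_contains v r xs
  have hle : Nat.choose ((xs.filter (fun x => !(x == v))).length) r ≤
      Nat.choose xs.length r :=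
    Nat.choose_le_choose _ (List.length_filter_le _ _)
  have h3 : List.countP (fun a => decide ¬(a.contains v = true)) (pyCombinations r xs) =
      List.countP (fun j => !(j.contains v)) (pyCombinations r xs) :=
    List.countP_congr (fun a _ => by simp)
  rw [h3, h2] at h
  omega

theorem combHelperAux (n : Nat) (r : Nat) (hr : r ≤ n) :
    (PySem.List.pyRange 0 (r : Int) 1).foldl
        (fun out t => PySem.Int.floordiv (out * ((n : Int) - t)) (t + 1)) 1 =
      (Nat.choose n r : Int) := by
  induction r with
  | zero => simp [PySem.List.pyRange_one_eq_nil]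
  | succ r ih =>
    have h0 : ((r + 1 : Nat) : Int) = (r : Int) + 1 := by push_cast; ring
    rw [h0, PySem.List.pyRange_one_succ_right (by positivity), List.foldl_append,
      ih (by omega)]
    simp only [List.foldl_cons, List.foldl_nil]
    have h1 : ((n : Int) - (r : Int)) = ((n - r : Nat) : Int) := by omega
    have h2 : Nat.choose n r * (n - r) = Nat.choose n (r + 1) * (r + 1) :=
      (Nat.choose_succ_right_eq n r).symm
    have h3 : ((r : Int) + 1) = ((r + 1 : Nat) : Int) := by push_cast; ring
    rw [h1, ← Nat.cast_mul, h2, h3, PySem.Int.floordiv_natCast,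
      Nat.mul_div_cancel _ (Nat.succ_pos r)]

theorem combHelper_eq (n r : Nat) : combHelper (n : Int) (r : Int) = (Nat.choose n r : Int) := by
  unfold combHelper
  by_cases h : n < r
  · rw [if_pos, Nat.choose_eq_zero_of_lt h] <;> simp [h]
  · rw [if_neg (by simp; omega), combHelperAux n r (by omega)]

theorem filter_len_add_count (v : Int) (xs : List Int) :
    (xs.filter (fun x => !(x == v))).length + xs.count v = xs.length := by
  induction xs with
  | nil => simp
  | cons x rest ih =>
    by_cases hx : (x == v) = true
    · simp only [List.filter_cons, hx, Bool.not_true, List.count_cons]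
      simp only [beq_iff_eq] at hx
      simp [hx, ← ih]
      omega
    · simp only [List.filter_cons, hx, Bool.not_false, List.count_cons]
      simp only [beq_iff_eq] at hx
      simp [← ih]
      omega

theorem group_count_eq (xs : List Int) :
    (PySem.List.pyRange ((if ((xs.length : Int) - 3) < 0 then 0 else (xs.length : Int) - 3) + 1)
        (xs.length : Int) 1).foldl (fun c i =>
        (pyCombinations i.toNat xs).foldl (fun c j =>
          if (PySem.List.pyGet? xs ((xs.length : Int) - 1)).any (fun v => j.contains v)
          then c + 1 else c) c) 0 =
    (if 2 ≤ (xs.length : Int) then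
        match PySem.List.pyGet? xs (-1) with
        | some v =>
            (PySem.List.pyRange (max ((xs.length : Int) - 2) 1) (xs.length : Int) 1).foldl
              (fun c i => c + (combHelper (xs.length : Int) i -
                combHelper ((xs.length : Int) - (PySem.List.count xs v : Int)) i)) 0
        | none => 0
      else 0) := by
  by_cases hm : 2 ≤ (xs.length : Int)
  · -- nonempty group with at least two elements
    have hmN : 2 ≤ xs.length := by exact_mod_cast hm
    have hne : xs ≠ [] := by
      intro h; rw [h] at hmN; simp at hmN
    obtain ⟨v, hv⟩ : ∃ v, xs.getLast? = some v := by
      cases h : xs.getLast? with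
      | none => exact absurd (List.getLast?_eq_none_iff.mp h) hne
      | some v => exact ⟨v, rfl⟩
    have hgetA : PySem.List.pyGet? xs ((xs.length : Int) - 1) = some v := by
      have h1 : ((xs.length : Int) - 1) = ((xs.length - 1 : Nat) : Int) := by
        push_cast [Nat.cast_sub (by omega : 1 ≤ xs.length)]; ring
      rw [h1, PySem.List.pyGet?_natCast, ← List.getLast?_eq_getElem?, hv]
    have hgetB : PySem.List.pyGet? xs (-1) = some v := by
      rw [PySem.List.pyGet?_neg_one, hv]
    rw [if_pos hm, hgetB]
    simp only [hgetA, Option.any_some, PySem.List.foldl_if_add_one]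
    have hrange : (if ((xs.length : Int) - 3) < 0 then 0 else (xs.length : Int) - 3) + 1 =
        max ((xs.length : Int) - 2) 1 := by split_ifs <;> omega
    rw [hrange, PySem.List.foldl_add, PySem.List.foldl_add]
    congr 1
    apply congrArg
    apply List.map_congr_left
    intro i hi
    rw [PySem.List.mem_pyRange_one] at hi
    have hi1 : 1 ≤ i := le_trans (le_max_right _ _) hi.1
    have hiN : ((i.toNat : Nat) : Int) = i := Int.toNat_of_nonneg (by omega)
    have hflen : ((xs.filter (fun x => !(x == v))).length : Int) =
        (xs.length : Int) - (PySem.List.count xs v : Int) := by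
      have := filter_len_add_count v xs
      rw [PySem.List.count_eq]
      omega
    have hle : Nat.choose ((xs.filter (fun x => !(x == v))).length) i.toNat ≤
        Nat.choose xs.length i.toNat :=
      Nat.choose_le_choose _ (List.length_filter_le _ _)
    have hA : combHelper (xs.length : Int) i = (Nat.choose xs.length i.toNat : Int) := by
      rw [← hiN, combHelper_eq, Int.toNat_natCast]
    have hB : combHelper ((xs.length : Int) - (PySem.List.count xs v : Int)) i =
        (Nat.choose ((xs.filter (fun x => !(x == v))).length) i.toNat : Int) := by
      rw [← hflen, ← hiN, combHelper_eq, Int.toNat_natCast]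
    rw [countP_contains, hA, hB]
    exact Nat.cast_sub hle
  · -- groups of length 0 or 1: both counts are 0
    have hmN : (xs.length : Int) ≤ 1 := by omega
    rw [if_neg hm]
    have h1 : (if ((xs.length : Int) - 3) < 0 then 0 else (xs.length : Int) - 3) + 1 = 1 := by
      split_ifs <;> omega
    rw [h1, PySem.List.pyRange_one_eq_nil hmN, List.foldl_nil]

-- ===== VERDICT (by name: the statement is the Claim_ definition above) =====
theorem combs_spec : Claim_equal_combs := by
  intro xss _
  unfold Spec_combs combs combs_alt
  congr 1
  funext total xs
  simp only [group_count_eq]
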